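-- pv_equiv track=rewrite | github.com/ghurone/GhuCrypt | decrypt.py | decriptao
-- ===== SOURCE A (Python) =====
-- def decriptao(string):  # função que recebe uma string encriptada
--     base_list = 'ZEQUINHAzequinha'  # String que representa uma "Tabela"
--     list_index = []  # Lista que contém os índices de cada caractere em relação a "Tabela"
--     string_decr = ''  # String que guarda os binários dos índices concatenados
--     str_decrypted = ''  # String que armazena os binários transformados em caracteres (bin -> dec - > char)
--
--     # Acha o respectivo índice na tabela pelo valor de cada elemento da string
--     for i in range(0, len(string)):
--         list_index.append(base_list.index(string[i]))
--
--     # Transforma cada índice em binário de 4b e os concatena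
--     for i, v in enumerate(list_index):
--         string_decr += f'{v:04b}'  # Os binários são de 4b, por se tratar de uma tabela de 16 char
--
--     # Divide a string_decr em grupos de 8b, e transforma o binário em decimal e de decimal para ascii
--     for i in range(0, len(string_decr), 8):
--         str_decrypted += chr(int(string_decr[i: i+8], 2))
--
--     return str_decrypted
-- ===== SOURCE B (Python) =====
-- def decriptao(string):
--     table = 'ZEQUINHAzequinha'
--     out = []
--     it = iter(string)
--     for hi in it:  # one paired walk: hi nibble, then lo nibble if present
--         h = table.index(hi)
--         lo = next(it, None)
--         if lo is None:
--             out.append(chr(h))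
--         else:
--             out.append(chr(h * 16 + table.index(lo)))
--     return ''.join(out)
-- ===== Notes on version B (the rewrite author's own statement) =====
-- stated objective: simpler
-- what changed: B drops A's intermediate 4-bit bit-string and the regrouping/parsing pass entirely: it walks the input two characters at a time and emits chr(hi*16+lo) directly (chr(hi) for a lone trailing char), in one pass with no binary-string formatting or int(...,2) parsing.
import Mathlib
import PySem

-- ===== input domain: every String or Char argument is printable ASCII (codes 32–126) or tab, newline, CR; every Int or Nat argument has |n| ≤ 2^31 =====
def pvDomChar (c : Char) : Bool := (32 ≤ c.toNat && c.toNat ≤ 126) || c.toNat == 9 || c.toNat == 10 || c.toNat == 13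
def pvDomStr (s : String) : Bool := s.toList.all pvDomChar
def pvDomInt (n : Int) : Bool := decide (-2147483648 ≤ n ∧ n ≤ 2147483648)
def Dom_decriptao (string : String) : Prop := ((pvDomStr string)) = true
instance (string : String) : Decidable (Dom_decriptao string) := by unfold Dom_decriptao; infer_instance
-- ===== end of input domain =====

-- B replaces A's 4-bit bit-string + regrouping passes by one paired walk emitting hi*16+lo directly (simpler).

-- ===== PORT A =====
-- base_list.index(c): Python str.index on a single char = first index; total via getD, Pre_ guarantees membership
-- the table 'ZEQUINHAzequinha' as an explicit char list (kernel-friendly)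
def pvTbl : List Char := ['Z','E','Q','U','I','N','H','A','z','e','q','u','i','n','h','a']
def pvIdx (c : Char) : Nat := (PySem.List.index? pvTbl c).getD 0

-- f'{v:04b}': binary digits of v, zero-padded on the left to width 4 (exact for v ≥ 0)
-- structural fuel recursion (fuel = n suffices: the argument halves each step), so the kernel can evaluate it
def pvNatBinAux : Nat → Nat → List Char
  | _, 0 => []
  | 0, _ + 1 => []
  | fuel + 1, n + 1 => pvNatBinAux fuel ((n + 1) / 2) ++ [if (n + 1) % 2 == 1 then '1' else '0']

def pvNatBin (n : Nat) : List Char := pvNatBinAux n n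

def pvBin4 (v : Nat) : List Char :=
  let s := if v = 0 then ['0'] else pvNatBin v
  List.replicate (4 - s.length) '0' ++ s

-- int(s, 2) on a string of '0'/'1' digits
def pvBinToNat (cs : List Char) : Nat :=
  cs.foldl (fun n c => 2 * n + (if c == '1' then 1 else 0)) 0

-- for i in range(0, len, 8): += chr(int(s[i:i+8], 2));   s[i:i+8] with 0 ≤ i is (drop i).take 8 exactly
def pvLoop3 (cs : List Char) (i : Nat) : List Char :=
  if _h : i < cs.length then
    Char.ofNat (pvBinToNat ((cs.drop i).take 8)) :: pvLoop3 cs (i + 8)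
  else []
termination_by cs.length - i

def decriptao (string : String) : String :=
  let listIndex := string.toList.map (fun c => pvIdx c)
  let stringDecr := listIndex.foldl (fun acc v => acc ++ pvBin4 v) []
  String.ofList (pvLoop3 stringDecr 0)

-- ===== PORT B =====
-- one paired walk over the characters: full pair → chr(hi*16+lo), lone trailing char → chr(hi)
def pvPairs : List Char → List Char
  | [] => []
  | [c] => [Char.ofNat (pvIdx c)]
  | c :: d :: rest => Char.ofNat (pvIdx c * 16 + pvIdx d) :: pvPairs rest

def decriptao_alt (string : String) : String :=
  String.ofList (pvPairs string.toList)

-- ===== PRECONDITION & SPEC =====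
-- A raises ValueError on any character outside the 16-char table; exactly those inputs are excluded.
def Pre_decriptao (string : String) : Prop :=
  (string.toList.all (fun c => pvTbl.contains c)) = true
instance (string : String) : Decidable (Pre_decriptao string) := by unfold Pre_decriptao; infer_instance

def pvWitness_decriptao : String := "ZEQUi"

def Spec_decriptao (string : String) (out : String) : Prop := out = decriptao_alt string
instance (string : String) (out : String) : Decidable (Spec_decriptao string out) := by unfold Spec_decriptao; infer_instance

-- ===== CLAIM (what is proved, stated in full; the proofs are below) =====
def Claim_equal_decriptao : Prop := ∀ (string : String), Dom_decriptao string → Pre_decriptao string → Spec_decriptao string (decriptao string)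

-- ===== LEMMAS AND PROOFS =====

-- small decidable facts about the 4-bit codes
theorem pvBin4_len : ∀ v < 16, (pvBin4 v).length = 4 := by decide
theorem pvBin4_ne_nil : ∀ v < 16, pvBin4 v ≠ [] := by decide
theorem pvBinToNat_bin4 : ∀ v < 16, pvBinToNat (pvBin4 v) = v := by decide
theorem pvBinToNat_bin4_pair : ∀ a < 16, ∀ b < 16, pvBinToNat (pvBin4 a ++ pvBin4 b) = a * 16 + b := by decide
theorem pvIdx_lt : ∀ c ∈ pvTbl, pvIdx c < 16 := by
  intro c hc
  have hlen : pvTbl.length = 16 := by decide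
  have : (PySem.List.index? pvTbl c).getD 0 < pvTbl.length := by
    rw [PySem.List.index?_eq_idxOf?]
    rcases h' : pvTbl.idxOf? c with _ | k
    · exact absurd (List.idxOf?_eq_none_iff.mp h') (by simpa using hc)
    · simpa using List.idxOf?_eq_some_iff.mp h' |>.1
  simpa [pvIdx, hlen] using this

-- A's third loop in take/drop form
def pvChunk8 (l : List Char) : List Char :=
  if _h : l = [] then [] else Char.ofNat (pvBinToNat (l.take 8)) :: pvChunk8 (l.drop 8)
termination_by l.length
decreasing_by
  have : 0 < l.length := List.length_pos_iff.mpr _h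
  simp [List.length_drop]; omega

theorem pvChunk8_nil : pvChunk8 [] = [] := by rw [pvChunk8]; simp

theorem pvChunk8_ne (l : List Char) (h : l ≠ []) :
    pvChunk8 l = Char.ofNat (pvBinToNat (l.take 8)) :: pvChunk8 (l.drop 8) := by
  rw [pvChunk8]; simp [h]

theorem pvLoop3_eq_chunk8 (cs : List Char) (i : Nat) : pvLoop3 cs i = pvChunk8 (cs.drop i) := by
  rw [pvLoop3]
  split
  · rename_i h
    have hne : cs.drop i ≠ [] := by
      rw [← List.length_pos_iff, List.length_drop]; omega
    have hd : (cs.drop i).drop 8 = cs.drop (i + 8) := by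
      rw [List.drop_drop]
    rw [pvChunk8_ne _ hne, pvLoop3_eq_chunk8 cs (i + 8), hd]
  · rename_i h
    rw [List.drop_eq_nil_of_le (by omega), pvChunk8_nil]
termination_by cs.length - i

theorem pvFoldl_append_bin4 (ix : List Nat) (acc : List Char) :
    ix.foldl (fun acc v => acc ++ pvBin4 v) acc = acc ++ ix.flatMap pvBin4 := by
  induction ix generalizing acc with
  | nil => simp
  | cons v t ih => simp [List.foldl_cons, ih, List.flatMap_cons]

theorem pvKey (l : List Char) (h : ∀ c ∈ l, c ∈ pvTbl) :
    pvChunk8 ((l.map pvIdx).flatMap pvBin4) = pvPairs l := by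
  induction l using pvPairs.induct with
  | case1 => simp [pvChunk8_nil, pvPairs]
  | case2 c =>
    have hc : pvIdx c < 16 := pvIdx_lt c (h c (by simp))
    have hlen := pvBin4_len _ hc
    have hne := pvBin4_ne_nil _ hc
    simp only [List.map_cons, List.map_nil, List.flatMap_cons, List.flatMap_nil, List.append_nil]
    rw [pvChunk8_ne _ hne, List.take_of_length_le (by omega), List.drop_eq_nil_of_le (by omega),
      pvChunk8_nil, pvBinToNat_bin4 _ hc, pvPairs]
  | case3 c d rest ih =>
    have hc : pvIdx c < 16 := pvIdx_lt c (h c (by simp))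
    have hd : pvIdx d < 16 := pvIdx_lt d (h d (by simp))
    have hlc := pvBin4_len _ hc
    have hld := pvBin4_len _ hd
    have hrest : ∀ x ∈ rest, x ∈ pvTbl := fun x hx => h x (by simp [hx])
    simp only [List.map_cons, List.flatMap_cons, ← List.append_assoc]
    have hlen : (pvBin4 (pvIdx c) ++ pvBin4 (pvIdx d)).length = 8 := by
      simp [List.length_append, hlc, hld]
    have hne : pvBin4 (pvIdx c) ++ pvBin4 (pvIdx d) ++ (rest.map pvIdx).flatMap pvBin4 ≠ [] := by
      simp [← List.length_pos_iff, hld]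
    rw [pvChunk8_ne _ hne,
      show (8 : Nat) = (pvBin4 (pvIdx c) ++ pvBin4 (pvIdx d)).length from hlen.symm,
      List.take_left, List.drop_left]
    rw [pvBinToNat_bin4_pair _ hc _ hd, ih hrest, pvPairs]

-- ===== VERDICT (by name: the statement is the Claim_ definition above) =====
theorem decriptao_spec : Claim_equal_decriptao := by
  intro s _ hpre
  have hpre' : ∀ c ∈ s.toList, c ∈ pvTbl := by
    intro c hc
    simpa using List.all_eq_true.mp hpre c hc
  unfold Spec_decriptao decriptao decriptao_alt
  simp only [pvLoop3_eq_chunk8, List.drop_zero, pvFoldl_append_bin4, List.nil_append, pvKey _ hpre']
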